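-- pv_equiv track=rewrite | github.com/PandeApeksha/apeksha_pande_FBS_work | Core_Python/Assignments/Assignment12.py/larger_string.py | larger_string
-- ===== SOURCE A (Python) =====
-- def larger_string(str1, str2):
--     len1 = 0
--     len2 = 0
--
--     for char in str1:
--         len1 += 1
--     for char in str2:
--         len2 += 1
--
--     if(len1 > len2):
--         return 'str1 is larger.'
--     elif(len2 > len1):
--         return 'str2 is larger.'
--     else:
--         return 'both strings are same in length.'
-- ===== SOURCE B (Python) =====
-- def larger_string(str1, str2):
--     if len(str1) > len(str2):
--         return 'str1 is larger.'
--     elif len(str2) > len(str1):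
--         return 'str2 is larger.'
--     else:
--         return 'both strings are same in length.'
-- ===== Notes on version B (the rewrite author's own statement) =====
-- stated objective: idiomatic
-- what changed: Both O(n) character-counting loops are removed; B compares the built-in len() of the two strings directly.
import Mathlib
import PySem

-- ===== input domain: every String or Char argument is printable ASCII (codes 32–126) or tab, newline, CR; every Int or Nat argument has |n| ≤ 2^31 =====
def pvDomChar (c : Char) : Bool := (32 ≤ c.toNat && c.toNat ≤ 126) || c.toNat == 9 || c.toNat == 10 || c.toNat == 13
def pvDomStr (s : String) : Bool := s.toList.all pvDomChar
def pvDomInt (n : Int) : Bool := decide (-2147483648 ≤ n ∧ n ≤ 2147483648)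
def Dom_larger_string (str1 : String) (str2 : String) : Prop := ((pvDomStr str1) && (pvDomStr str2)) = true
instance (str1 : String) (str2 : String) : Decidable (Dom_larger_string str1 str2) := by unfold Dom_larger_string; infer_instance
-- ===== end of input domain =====

-- B replaces A's two manual character-counting loops with a direct comparison of the
-- built-in lengths (idiomatic, O(1) extra work over len()).

-- ===== PORT A =====
-- A counts the characters of each string with an explicit loop, then compares the counts.
def larger_string (str1 : String) (str2 : String) : String :=
  let len1 : Int := str1.toList.foldl (fun acc _ => acc + 1) 0
  let len2 : Int := str2.toList.foldl (fun acc _ => acc + 1) 0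
  if len1 > len2 then "str1 is larger."
  else if len2 > len1 then "str2 is larger."
  else "both strings are same in length."

-- ===== PORT B =====
-- B compares len(str1) and len(str2) directly (PySem.Str.len = Python len()).
def larger_string_alt (str1 : String) (str2 : String) : String :=
  if PySem.Str.len str1 > PySem.Str.len str2 then "str1 is larger."
  else if PySem.Str.len str2 > PySem.Str.len str1 then "str2 is larger."
  else "both strings are same in length."

-- ===== PRECONDITION & SPEC =====
def Spec_larger_string (str1 : String) (str2 : String) (out : String) : Prop := out = larger_string_alt str1 str2
instance (str1 : String) (str2 : String) (out : String) : Decidable (Spec_larger_string str1 str2 out) := by unfold Spec_larger_string; infer_instance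

-- ===== CLAIM (what is proved, stated in full; the proofs are below) =====
def Claim_equal_larger_string : Prop := ∀ (str1 : String) (str2 : String), Dom_larger_string str1 str2 → Spec_larger_string str1 str2 (larger_string str1 str2)

-- ===== LEMMAS AND PROOFS =====
-- A's counting loop computes the length.
theorem foldl_count_eq_length (l : List Char) (n : Int) :
    l.foldl (fun acc _ => acc + 1) n = n + l.length := by
  induction l generalizing n with
  | nil => simp
  | cons c t ih => simp [List.foldl, ih]; ring

-- ===== VERDICT (by name: the statement is the Claim_ definition above) =====
theorem larger_string_spec : Claim_equal_larger_string := by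
  intro str1 str2 _
  unfold Spec_larger_string larger_string larger_string_alt
  simp [foldl_count_eq_length, PySem.Str.len_eq]
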